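-- pv_equiv track=rewrite | github.com/hamo-o/algorithm | dynamic_programming/2775.py | memo_home
-- ===== SOURCE A (Python) =====
-- def memo_home(a, b):
--     memo = [[0 for _ in range(b)] for _ in range(a+1)]
--
--     for i in range(b):
--         memo[0][i] = i+1
--
--     for i in range(1, a+1):
--         for j in range(b):
--             if j == 0:
--                 memo[i][j] = 1
--             else:
--                 memo[i][j] = memo[i][j-1] + memo[i-1][j]
--
--     return memo[a][b-1]
-- ===== SOURCE B (Python) =====
-- def memo_home(a, b):
--     # closed form: the DP value is the binomial coefficient C(a+b, b-1) = C(a+b, a+1),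
--     # computed by the usual multiplicative running-product loop on the smaller index.
--     k = min(a + 1, b - 1)
--     res = 1
--     for i in range(k):
--         res = res * (a + b - i) // (i + 1)
--     return res
-- ===== Notes on version B (the rewrite author's own statement) =====
-- stated objective: faster
-- what changed: Replaces the O(a*b) two-dimensional DP table with the closed-form binomial coefficient C(a+b, b-1) computed by a single multiplicative loop of min(a+1, b-1) exact steps.
import Mathlib
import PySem

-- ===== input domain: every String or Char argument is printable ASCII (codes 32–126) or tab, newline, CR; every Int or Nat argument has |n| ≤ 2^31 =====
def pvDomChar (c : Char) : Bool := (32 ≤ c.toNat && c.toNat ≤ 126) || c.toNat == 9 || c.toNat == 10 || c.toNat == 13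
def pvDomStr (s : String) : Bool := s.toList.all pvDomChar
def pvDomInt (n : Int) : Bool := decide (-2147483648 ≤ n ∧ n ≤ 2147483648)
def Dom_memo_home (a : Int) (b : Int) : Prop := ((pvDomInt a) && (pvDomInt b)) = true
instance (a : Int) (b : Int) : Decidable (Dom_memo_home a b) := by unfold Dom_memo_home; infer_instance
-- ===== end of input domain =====

-- B replaces A's O(a*b) DP table with the closed-form binomial coefficient C(a+b, b-1)
-- computed by a single multiplicative loop.


-- ===== PORT A =====
-- Literal transliteration of the Python DP, with the table held as Array (Array Int) so
-- that each memo[i][j] = v is an O(1) in-place write as in Python (the slot is cleared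
-- with setIfInBounds i #[] before the element write purely so the runtime does not copy
-- the row; the computed values are unchanged).  Every index that occurs on runs admitted
-- by Pre_ is nonnegative and in range, so .toNat/getD/setIfInBounds are exact there;
-- where Python would raise IndexError, Pre_ excludes the input.
def memo_home (a : Int) (b : Int) : Int :=
  let memo : Array (Array Int) :=
    ((PySem.List.pyRange 0 (a+1) 1).map
      (fun _ => ((PySem.List.pyRange 0 b 1).map (fun _ => (0:Int))).toArray)).toArray
  let memo := (PySem.List.pyRange 0 b 1).foldl
      (fun m i =>
        let row := m.getD 0 #[]
        let m := m.setIfInBounds 0 #[]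
        m.setIfInBounds 0 (row.setIfInBounds i.toNat (i+1))) memo
  let memo := (PySem.List.pyRange 1 (a+1) 1).foldl
      (fun m i => (PySem.List.pyRange 0 b 1).foldl
        (fun m j =>
          if j == 0 then
            let row := m.getD i.toNat #[]
            let m := m.setIfInBounds i.toNat #[]
            m.setIfInBounds i.toNat (row.setIfInBounds j.toNat 1)
          else
            let v := (m.getD i.toNat #[]).getD (j-1).toNat 0 +
                     (m.getD (i-1).toNat #[]).getD j.toNat 0
            let row := m.getD i.toNat #[]
            let m := m.setIfInBounds i.toNat #[]
            m.setIfInBounds i.toNat (row.setIfInBounds j.toNat v))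
        m) memo
  (memo.getD a.toNat #[]).getD (b-1).toNat 0

-- ===== PORT B =====
def memo_home_alt (a : Int) (b : Int) : Int :=
  let k := min (a+1) (b-1)
  (PySem.List.pyRange 0 k 1).foldl
    (fun res i => PySem.Int.floordiv (res * (a + b - i)) (i + 1)) 1

-- ===== PRECONDITION & SPEC =====
-- Pre_ = exactly the inputs where the Python A returns; for a < 0 or b < 1 the table has
-- no row 0 / row a or its rows are empty, and A raises IndexError.
def Pre_memo_home (a : Int) (b : Int) : Prop := 0 ≤ a ∧ 1 ≤ b
instance (a : Int) (b : Int) : Decidable (Pre_memo_home a b) := by unfold Pre_memo_home; infer_instance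
def pvWitness_memo_home : Int × Int := (3, 4)
def Spec_memo_home (a : Int) (b : Int) (out : Int) : Prop := out = memo_home_alt a b
instance (a : Int) (b : Int) (out : Int) : Decidable (Spec_memo_home a b out) := by unfold Spec_memo_home; infer_instance

-- ===== CLAIM (what is proved, stated in full; the proofs are below) =====
def Claim_equal_memo_home : Prop := ∀ (a : Int) (b : Int), Dom_memo_home a b → Pre_memo_home a b → Spec_memo_home a b (memo_home a b)

-- ===== LEMMAS AND PROOFS =====

-- the closed-form row: entry j of row i of the finished DP table is C(i+j+1, i+1)
def srow (i B : Nat) : List Int := (List.range B).map (fun j => (((i+j+1).choose (i+1) : Nat) : Int))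

def zrow (B : Nat) : List Int := List.replicate B 0

-- row i of the table with only the first m entries filled in
def prow (i B m : Nat) : List Int :=
  (List.range B).map (fun j => if j < m then (((i+j+1).choose (i+1) : Nat) : Int) else 0)

-- the table after the outer loop has processed rows 1..i (a+1 rows in total)
def tbl (A i B : Nat) : List (List Int) :=
  (List.range (i+1)).map (fun r => srow r B) ++ List.replicate (A - i) (zrow B)

-- list-level models of the three loop bodies (the array port is related to them below)
def lrow0 : List (List Int) → Int → List (List Int) :=
  fun m i => m.set 0 ((m.getD 0 []).set i.toNat (i+1))

def lstep (p q : Nat) : List (List Int) → Int → List (List Int) :=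
  fun m j =>
    if j == 0 then
      m.set p ((m.getD p []).set j.toNat 1)
    else
      m.set p ((m.getD p []).set j.toNat
        ((m.getD p []).getD (j-1).toNat 0 + (m.getD q []).getD j.toNat 0))

-- ---------- generic list/array helpers ----------
lemma getD_append_len {α : Type} (front : List α) (x : α) (rest : List α) (d : α) :
    (front ++ x :: rest).getD front.length d = x := by
  induction front with
  | nil => rfl
  | cons h t ih => simp

lemma set_append_len {α : Type} (front : List α) (x y : α) (rest : List α) :
    (front ++ x :: rest).set front.length y = front ++ y :: rest := by
  induction front with
  | nil => rfl
  | cons h t ih => simp [ih]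

lemma arr_getD_toList (a : Array Int) (i : Nat) (d : Int) :
    a.getD i d = a.toList.getD i d := by
  rcases a with ⟨l⟩; simp [Array.getD, List.getD]; split <;> simp_all

lemma arr_row_toList (m : Array (Array Int)) (i : Nat) :
    (m.getD i #[]).toList = (m.toList.map Array.toList).getD i [] := by
  rcases m with ⟨l⟩; simp [Array.getD, List.getD]; split <;> simp_all

-- ---------- B side: the multiplicative loop computes the binomial coefficient ----------
lemma alt_loop (n : Nat) : ∀ m : Nat, m ≤ n →
    (PySem.List.pyRange 0 (m:Int) 1).foldl
      (fun res k => PySem.Int.floordiv (res * ((n:Int) - k)) (k + 1)) 1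
      = ((n.choose m : Nat) : Int) := by
  intro m
  induction m with
  | zero => intro _; simp [PySem.List.pyRange_one_eq_nil]
  | succ m ih =>
    intro h
    have h' : m ≤ n := Nat.le_of_succ_le h
    have hsplit : PySem.List.pyRange 0 ((m:Int)+1) 1
        = PySem.List.pyRange 0 (m:Int) 1 ++ [(m:Int)] :=
      PySem.List.pyRange_one_succ_right (by positivity)
    have hc1 : ((m+1 : Nat) : Int) = (m:Int) + 1 := by push_cast; ring
    rw [hc1, hsplit, List.foldl_append, ih h']
    have hm : (n:Int) - (m:Int) = ((n - m : Nat) : Int) := by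
      have := Nat.le_of_lt h; push_cast [this]; ring
    simp only [List.foldl_cons, List.foldl_nil, hm]
    have hc : ((n.choose m : Nat) : Int) * ((n - m : Nat) : Int)
        = ((n.choose (m+1) * (m+1) : Nat) : Int) := by
      exact_mod_cast (Nat.choose_succ_right_eq n m).symm
    rw [hc, ← hc1, PySem.Int.floordiv_natCast]
    simp

lemma alt_closed (a b : Int) (ha : 0 ≤ a) (hb : 1 ≤ b) :
    memo_home_alt a b = (((a+b).toNat.choose (min (a+1) (b-1)).toNat : Nat) : Int) := by
  unfold memo_home_alt
  have hn : ((a+b).toNat : Int) = a + b := Int.toNat_of_nonneg (by omega)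
  have hm : (((min (a+1) (b-1)).toNat : Nat) : Int) = min (a+1) (b-1) := by
    rcases le_total (a+1) (b-1) with h | h <;> simp [h] <;> omega
  have hle : (min (a+1) (b-1)).toNat ≤ (a+b).toNat := by
    rcases le_total (a+1) (b-1) with h | h <;> omega
  have h := alt_loop (a+b).toNat (min (a+1) (b-1)).toNat hle
  rw [hm, hn] at h
  rw [← h]

-- ---------- A side, relating the array folds to the list-level models ----------
lemma sim_row0 (js : List Int) (m : Array (Array Int)) :
    ((js.foldl (fun m i =>
        (m.setIfInBounds 0 #[]).setIfInBounds 0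
          ((m.getD 0 #[]).setIfInBounds i.toNat (i+1))) m).toList.map Array.toList)
      = js.foldl lrow0 (m.toList.map Array.toList) := by
  induction js generalizing m with
  | nil => rfl
  | cons x t ih =>
    simp only [List.foldl_cons, ih]
    congr 1
    simp [lrow0, Array.toList_setIfInBounds, List.map_set]

lemma sim_inner (p q : Nat) (js : List Int) (m : Array (Array Int)) :
    ((js.foldl (fun m j =>
        if j == 0 then
          (m.setIfInBounds p #[]).setIfInBounds p
            ((m.getD p #[]).setIfInBounds j.toNat 1)
        else
          (m.setIfInBounds p #[]).setIfInBounds p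
            ((m.getD p #[]).setIfInBounds j.toNat
              ((m.getD p #[]).getD (j-1).toNat 0 + (m.getD q #[]).getD j.toNat 0))) m).toList.map Array.toList)
      = js.foldl (lstep p q) (m.toList.map Array.toList) := by
  induction js generalizing m with
  | nil => rfl
  | cons x t ih =>
    simp only [List.foldl_cons, ih]
    congr 1
    by_cases hx : x == 0 <;>
      simp [lstep, hx, Array.toList_setIfInBounds, List.map_set]

lemma sim_outer (B : Int) (js : List Int) (m : Array (Array Int)) :
    ((js.foldl (fun m i => (PySem.List.pyRange 0 B 1).foldl
        (fun m j =>
          if j == 0 then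
            (m.setIfInBounds i.toNat #[]).setIfInBounds i.toNat
              ((m.getD i.toNat #[]).setIfInBounds j.toNat 1)
          else
            (m.setIfInBounds i.toNat #[]).setIfInBounds i.toNat
              ((m.getD i.toNat #[]).setIfInBounds j.toNat
                ((m.getD i.toNat #[]).getD (j-1).toNat 0 +
                 (m.getD (i-1).toNat #[]).getD j.toNat 0))) m) m).toList.map Array.toList)
      = js.foldl (fun L i => (PySem.List.pyRange 0 B 1).foldl
          (lstep i.toNat (i-1).toNat) L) (m.toList.map Array.toList) := by
  induction js generalizing m with
  | nil => rfl
  | cons x t ih =>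
    simp only [List.foldl_cons, ih]
    congr 1
    exact sim_inner x.toNat (x-1).toNat _ m

-- ---------- A side, first loop ----------
lemma zrow_eq_map (B : Nat) : zrow B = (List.range B).map (fun _ => (0:Int)) := by
  simp [zrow]

lemma set_map_range (B m : Nat) (f : Nat → Int) (v : Int) :
    ((List.range B).map f).set m v
      = (List.range B).map (fun j => if j = m then v else f j) := by
  apply List.ext_getElem
  · simp
  · intro k hk1 hk2
    simp only [List.getElem_set, List.getElem_map, List.getElem_range]
    by_cases hkm : k = m
    · subst hkm; simp
    · simp [hkm, Ne.symm hkm]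

lemma prow_zero (i B : Nat) : prow i B 0 = zrow B := by
  rw [zrow_eq_map]; unfold prow
  apply List.map_congr_left; intro j _; simp

lemma prow_full (i B : Nat) : prow i B B = srow i B := by
  unfold prow srow
  apply List.map_congr_left; intro j hj
  rw [if_pos (List.mem_range.mp hj)]

-- the first loop acts only on row 0 of the table
lemma fold0_cons (l : List Int) (r : List Int) (rest : List (List Int)) :
    l.foldl lrow0 (r :: rest)
      = (l.foldl (fun r i => r.set i.toNat (i+1)) r) :: rest := by
  induction l generalizing r with
  | nil => rfl
  | cons x t ih =>
    simp only [List.foldl_cons, lrow0, List.getD_cons_zero, List.set_cons_zero]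
    exact ih _

lemma fill_row0 (B : Nat) : ∀ m : Nat, m ≤ B →
    (PySem.List.pyRange 0 (m:Int) 1).foldl (fun r i => r.set i.toNat (i+1)) (zrow B)
      = (List.range B).map (fun j => if j < m then ((j:Nat):Int)+1 else 0) := by
  intro m
  induction m with
  | zero =>
    intro _
    rw [show ((0:Nat):Int) = 0 from rfl, PySem.List.pyRange_one_eq_nil le_rfl]
    rw [zrow_eq_map]
    simp only [List.foldl_nil]
    apply List.map_congr_left; intro j _; simp
  | succ m ih =>
    intro h
    have h' : m ≤ B := Nat.le_of_succ_le h
    have hc1 : ((m+1 : Nat) : Int) = (m:Int) + 1 := by push_cast; ring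
    rw [hc1, PySem.List.pyRange_one_succ_right (by positivity), List.foldl_append, ih h']
    simp only [List.foldl_cons, List.foldl_nil, Int.toNat_natCast]
    rw [set_map_range]
    apply List.map_congr_left; intro j hj
    by_cases hjm : j = m
    · subst hjm; simp
    · have h1 : j < m ↔ j < m + 1 := by omega
      simp [hjm, h1]

lemma row0_spec (B : Nat) :
    (PySem.List.pyRange 0 (B:Int) 1).foldl (fun r i => r.set i.toNat (i+1)) (zrow B)
      = srow 0 B := by
  rw [fill_row0 B B le_rfl]
  unfold srow
  apply List.map_congr_left; intro j hj
  rw [if_pos (List.mem_range.mp hj)]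
  simp [Nat.choose_one_right]

-- ---------- A side, inner loop (filling row iN+1 from row iN) ----------
lemma fill_rowi (B iN : Nat) (front rest : List (List Int))
    (hlen : front.length = iN + 1) (hprev : front.getD iN [] = srow iN B) :
    ∀ m : Nat, m ≤ B →
    (PySem.List.pyRange 0 (m:Int) 1).foldl (lstep (iN+1) iN) (front ++ zrow B :: rest)
      = front ++ prow (iN+1) B m :: rest := by
  intro m
  induction m with
  | zero =>
    intro _
    rw [show ((0:Nat):Int) = 0 from rfl, PySem.List.pyRange_one_eq_nil le_rfl]
    rw [prow_zero]
    rfl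
  | succ m ih =>
    intro h
    have h' : m ≤ B := Nat.le_of_succ_le h
    have hmB : m < B := h
    have hc1 : ((m+1 : Nat) : Int) = (m:Int) + 1 := by push_cast; ring
    rw [hc1, PySem.List.pyRange_one_succ_right (by positivity), List.foldl_append, ih h']
    simp only [List.foldl_cons, List.foldl_nil, lstep]
    have hgetcur : (front ++ prow (iN+1) B m :: rest).getD (iN+1) [] = prow (iN+1) B m := by
      rw [← hlen]; exact getD_append_len front _ rest []
    have hgetprev : (front ++ prow (iN+1) B m :: rest).getD iN [] = srow iN B := by
      rw [List.getD_append _ _ _ _ (by omega), hprev]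
    have hset : ∀ y, (front ++ prow (iN+1) B m :: rest).set (iN+1) y = front ++ y :: rest := by
      intro y; rw [← hlen]; exact set_append_len front _ y rest
    by_cases hm0 : m = 0
    · subst hm0
      simp only [Nat.cast_zero, beq_self_eq_true, if_pos, Int.toNat_zero]
      rw [hgetcur, hset]
      have hrow : (prow (iN+1) B 0).set 0 1 = prow (iN+1) B 1 := by
        unfold prow
        rw [set_map_range]
        apply List.map_congr_left; intro j _
        by_cases hj0 : j = 0
        · subst hj0; simp [Nat.choose_self]
        · have h1 : ¬ j < 0 := by omega
          have h2 : ¬ j < 1 := by omega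
          simp [hj0, h1, h2]
      rw [hrow]
    · have hne : (((m:Nat):Int) == 0) = false := by
        simp only [beq_eq_false_iff_ne, ne_eq, Int.natCast_eq_zero]
        exact hm0
      rw [hne]
      simp only [Bool.false_eq_true, if_false, Int.toNat_natCast]
      rw [hgetcur, hgetprev, hset]
      have hm1 : 1 ≤ m := Nat.one_le_iff_ne_zero.mpr hm0
      have hidx : ((m:Int) - 1).toNat = m - 1 := by omega
      have hread1 : (prow (iN+1) B m).getD ((m:Int)-1).toNat 0
          = (((iN+1+(m-1)+1).choose (iN+1+1) : Nat) : Int) := by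
        rw [hidx]
        have hlt : m - 1 < B := by omega
        rw [List.getD_eq_getElem _ _ (by simpa [prow] using hlt)]
        simp [prow, show m - 1 < m by omega]
      have hread2 : (srow iN B).getD m 0
          = (((iN+m+1).choose (iN+1) : Nat) : Int) := by
        rw [List.getD_eq_getElem _ _ (by simpa [srow] using hmB)]
        simp [srow]
      rw [hread1, hread2]
      have hrow : (prow (iN+1) B m).set m
            ((((iN+1+(m-1)+1).choose (iN+1+1) : Nat) : Int)
              + (((iN+m+1).choose (iN+1) : Nat) : Int))
          = prow (iN+1) B (m+1) := by
        unfold prow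
        rw [set_map_range]
        apply List.map_congr_left; intro j _
        by_cases hjm : j = m
        · rw [if_pos hjm, if_pos (by omega), hjm]
          have h2 : iN + 1 + (m-1) + 1 = iN + m + 1 := by omega
          have h3 : iN + 1 + m + 1 = (iN + m + 1) + 1 := by omega
          rw [h2, h3]
          have hpascal : ((iN+m+1)+1).choose (iN+1+1)
              = (iN+m+1).choose (iN+1) + (iN+m+1).choose (iN+1+1) := by
            simpa using Nat.choose_succ_succ (iN+m+1) (iN+1)
          rw [hpascal]
          push_cast; ring
        · have h1 : j < m ↔ j < m + 1 := by omega
          simp [hjm, h1]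
      rw [hrow]

-- ---------- A side, outer loop ----------
lemma outer_loop (A B : Nat) : ∀ i : Nat, i ≤ A →
    (PySem.List.pyRange 1 ((i:Int)+1) 1).foldl
      (fun L i => (PySem.List.pyRange 0 (B:Int) 1).foldl (lstep i.toNat (i-1).toNat) L)
      (tbl A 0 B)
      = tbl A i B := by
  intro i
  induction i with
  | zero =>
    intro _
    rw [show ((0:Nat):Int) + 1 = 1 by norm_num, PySem.List.pyRange_one_eq_nil le_rfl]
    rfl
  | succ i ih =>
    intro h
    have h' : i ≤ A := Nat.le_of_succ_le h
    have hc1 : ((i+1 : Nat) : Int) + 1 = ((i:Int)+1) + 1 := by push_cast; ring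
    rw [hc1, PySem.List.pyRange_one_succ_right (by omega), List.foldl_append, ih h']
    simp only [List.foldl_cons, List.foldl_nil]
    have htoNat : ((i:Int)+1).toNat = i + 1 := by omega
    have hsub : ((i:Int)+1-1).toNat = (i:Nat) := by omega
    simp only [htoNat, hsub]
    have hAi : A - i = (A - (i+1)) + 1 := by omega
    have hshape : tbl A i B
        = ((List.range (i+1)).map (fun r => srow r B))
          ++ zrow B :: List.replicate (A - (i+1)) (zrow B) := by
      unfold tbl
      rw [hAi, List.replicate_succ]
    rw [hshape]
    rw [fill_rowi B i _ _ (by simp) ?_ B le_rfl]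
    · rw [prow_full]
      unfold tbl
      rw [List.range_succ (n := i+1), List.map_append]
      simp
    · rw [List.getD_eq_getElem _ _ (by simp)]
      simp

-- ---------- final assembly ----------
lemma a_closed (a b : Int) (ha : 0 ≤ a) (hb : 1 ≤ b) :
    memo_home a b = (((a+b).toNat.choose (a.toNat+1) : Nat) : Int) := by
  obtain ⟨A, hA⟩ : ∃ A : Nat, a = (A:Int) := ⟨a.toNat, (Int.toNat_of_nonneg ha).symm⟩
  obtain ⟨B, hB⟩ : ∃ B : Nat, b = (B:Int) := ⟨b.toNat, (Int.toNat_of_nonneg (by omega)).symm⟩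
  subst hA hB
  have hB1 : 1 ≤ B := by exact_mod_cast hb
  simp only [memo_home]
  rw [arr_getD_toList, arr_row_toList, sim_outer, sim_row0]
  -- the initial table of zeros
  have hinit : ((((PySem.List.pyRange 0 ((A:Int)+1) 1).map
        (fun _ => ((PySem.List.pyRange 0 (B:Int) 1).map (fun _ => (0:Int))).toArray)).toArray).toList.map Array.toList)
      = List.replicate (A+1) (zrow B) := by
    rw [zrow_eq_map]
    simp only [List.map_map]
    have hrow : (PySem.List.pyRange 0 (B:Int) 1).map (fun _ => (0:Int))
        = (List.range B).map (fun _ => (0:Int)) := by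
      apply List.ext_getElem <;> simp [PySem.List.length_pyRange_one]
    apply List.ext_getElem <;> simp [PySem.List.length_pyRange_one, hrow]
  rw [hinit, List.replicate_succ, fold0_cons, row0_spec]
  have htbl0 : (srow 0 B :: List.replicate A (zrow B)) = tbl A 0 B := by
    simp [tbl]
  rw [htbl0, outer_loop A B A le_rfl]
  unfold tbl
  simp only [Nat.sub_self, List.replicate_zero, List.append_nil, Int.toNat_natCast]
  have hrowA : ((List.range (A+1)).map (fun r => srow r B)).getD A [] = srow A B := by
    rw [List.getD_eq_getElem _ _ (by simp)]
    simp
  rw [hrowA]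
  have hidx : ((B:Int) - 1).toNat = B - 1 := by omega
  rw [hidx]
  rw [List.getD_eq_getElem _ _ (by simp [srow]; omega)]
  simp only [srow, List.getElem_map, List.getElem_range]
  have h1 : A + (B-1) + 1 = A + B := by omega
  have h2 : ((A:Int) + (B:Int)).toNat = A + B := by omega
  rw [h1, h2]

theorem memo_home_spec : Claim_equal_memo_home := by
  intro a b _ hpre
  obtain ⟨ha, hb⟩ := hpre
  unfold Spec_memo_home
  rw [a_closed a b ha hb, alt_closed a b ha hb]
  rcases le_total (a+1) (b-1) with h | h
  · have : (min (a+1) (b-1)).toNat = a.toNat + 1 := by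
      rw [min_eq_left h]; omega
    rw [this]
  · have hmin : (min (a+1) (b-1)).toNat = (b-1).toNat := by
      rw [min_eq_right h]
    rw [hmin]
    have h1 : (b-1).toNat ≤ (a+b).toNat := by omega
    have h2 : (a+b).toNat - (b-1).toNat = a.toNat + 1 := by omega
    rw [← h2, Nat.choose_symm h1]
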